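-- pv_equiv track=rewrite | github.com/loiccoyle/advent_of_code_2024 | 15/solution.py | widden_layout
-- ===== SOURCE A (Python) =====
-- from typing import Callable, Iterable
--
-- WALL = "#"
--
-- BOX = "O"
--
-- EMPTY = "."
--
-- ROBOT = "@"
--
-- BOX_WIDE = "[]"
--
-- def widden_layout(content: list[str]) -> Iterable[str]:
--     for line in content:
--         yield (
--             line.replace(WALL, WALL * 2)
--             .replace(EMPTY, EMPTY * 2)
--             .replace(BOX, BOX_WIDE)
--             .replace(ROBOT, ROBOT + EMPTY)
--         )
-- ===== SOURCE B (Python) =====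
-- def widden_layout(content):
--     mapping = {"#": "##", ".": "..", "O": "[]", "@": "@."}
--     for line in content:
--         yield "".join(mapping.get(ch, ch) for ch in line)
-- ===== Notes on version B (the rewrite author's own statement) =====
-- stated objective: simpler
-- what changed: One mapping dict built before the loop and a single per-character pass with ''.join replaces the chain of four str.replace scans over each line.
import Mathlib
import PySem

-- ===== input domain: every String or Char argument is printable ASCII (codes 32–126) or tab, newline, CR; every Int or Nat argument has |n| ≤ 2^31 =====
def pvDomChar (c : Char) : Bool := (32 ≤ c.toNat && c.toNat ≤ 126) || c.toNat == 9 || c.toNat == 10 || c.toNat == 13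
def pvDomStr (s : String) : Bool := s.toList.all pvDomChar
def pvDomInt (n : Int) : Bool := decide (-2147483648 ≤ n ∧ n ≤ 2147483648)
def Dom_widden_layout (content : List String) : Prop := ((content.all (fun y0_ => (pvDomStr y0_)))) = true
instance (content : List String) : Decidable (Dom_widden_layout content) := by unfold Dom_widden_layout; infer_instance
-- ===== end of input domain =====

-- B builds one character→replacement mapping and makes a single pass over each line,
-- instead of A's chain of four str.replace scans; objective: simpler (one pass, no intermediate strings).
-- A is a generator; both sides are modelled by the list of yielded lines.

-- ===== PORT A =====
def pvWALL : String := "#"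
def pvBOX : String := "O"
def pvEMPTY : String := "."
def pvROBOT : String := "@"
def pvBOX_WIDE : String := "[]"

def widden_layout (content : List String) : List String :=
  content.map (fun line =>
    PySem.Str.replace
      (PySem.Str.replace
        (PySem.Str.replace
          (PySem.Str.replace line pvWALL (pvWALL ++ pvWALL))
          pvEMPTY (pvEMPTY ++ pvEMPTY))
        pvBOX pvBOX_WIDE)
      pvROBOT (pvROBOT ++ pvEMPTY))

-- ===== PORT B =====
def pvMapping : PySem.Dict String String :=
  PySem.Dict.mk [("#", "##"), (".", ".."), ("O", "[]"), ("@", "@.")]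

def widden_layout_alt (content : List String) : List String :=
  content.map (fun line =>
    PySem.Str.join "" (line.toList.map (fun ch =>
      (pvMapping.get? (String.ofList [ch])).getD (String.ofList [ch]))))

-- ===== PRECONDITION & SPEC =====
def Spec_widden_layout (content : List String) (out : List String) : Prop := out = widden_layout_alt content
instance (content : List String) (out : List String) : Decidable (Spec_widden_layout content out) := by unfold Spec_widden_layout; infer_instance

-- ===== CLAIM (what is proved, stated in full; the proofs are below) =====
def Claim_equal_widden_layout : Prop := ∀ (content : List String), Dom_widden_layout content → Spec_widden_layout content (widden_layout content)

-- ===== LEMMAS AND PROOFS =====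

theorem go_single (c : Char) (new : List Char) : ∀ (l : List Char) (fuel : Nat) (acc : List Char), l.length ≤ fuel →
    PySem.Chars.replace.go [c] new fuel l acc = acc.reverse ++ l.flatMap (fun a => if a = c then new else [a]) := by
  intro l
  induction l with
  | nil => intro fuel acc h; cases fuel <;> simp [PySem.Chars.replace.go]
  | cons a t ih =>
    intro fuel acc h
    cases fuel with
    | zero => simp at h
    | succ n =>
      have ht : t.length ≤ n := by simpa using h
      simp only [PySem.Chars.replace.go]
      by_cases hc : a = c
      · subst hc
        simp [List.isPrefixOf, ih n _ ht]
      · simp [List.isPrefixOf, beq_iff_eq, Ne.symm hc, ih n _ ht, hc]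

theorem replace_single (s : List Char) (c : Char) (new : List Char) :
    PySem.Chars.replace s [c] new = s.flatMap (fun a => if a = c then new else [a]) := by
  simp [PySem.Chars.replace, go_single c new s s.length [] le_rfl]

theorem join_nil_flatten (l : List (List Char)) : PySem.Chars.join [] l = l.flatten := by
  induction l with
  | nil => rfl
  | cons x xs ih => simp [PySem.Chars.join, List.intercalate] at *; cases xs <;> simp_all [List.intersperse]

theorem key_beq_false (a : Char) (k : String) (h : String.ofList [a] ≠ k) : (k == String.ofList [a]) = false := by
  rw [beq_eq_false_iff_ne]
  exact fun he => h he.symm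

-- the composed per-character effect of A's four replaces equals B's mapping lookup
theorem char_map_eq (a : Char) :
    List.flatMap
        (fun x => List.flatMap
          (fun x => List.flatMap (fun b => if b = '@' then ['@','.'] else [b]) (if x = 'O' then ['[',']'] else [x]))
          (if x = '.' then ['.','.'] else [x]))
        (if a = '#' then ['#','#'] else [a])
      = ((pvMapping.get? (String.ofList [a])).getD (String.ofList [a])).toList := by
  by_cases h1 : a = '#'
  · subst h1; decide
  by_cases h2 : a = '.'
  · subst h2; decide
  by_cases h3 : a = 'O'
  · subst h3; decide
  by_cases h4 : a = '@'
  · subst h4; decide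
  have g : pvMapping.get? (String.ofList [a]) = none := by
    simp only [pvMapping, PySem.Dict.get?, List.find?]
    rw [key_beq_false a "#" (fun he => h1 (by simpa using congrArg String.toList he)),
        key_beq_false a "." (fun he => h2 (by simpa using congrArg String.toList he)),
        key_beq_false a "O" (fun he => h3 (by simpa using congrArg String.toList he)),
        key_beq_false a "@" (fun he => h4 (by simpa using congrArg String.toList he))]
    rfl
  simp [g, h1, h2, h3, h4]

theorem line_eq (line : String) :
    PySem.Str.replace
      (PySem.Str.replace
        (PySem.Str.replace (PySem.Str.replace line pvWALL (pvWALL ++ pvWALL)) pvEMPTY (pvEMPTY ++ pvEMPTY))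
        pvBOX pvBOX_WIDE)
      pvROBOT (pvROBOT ++ pvEMPTY)
    = PySem.Str.join "" (line.toList.map (fun ch =>
        (pvMapping.get? (String.ofList [ch])).getD (String.ofList [ch]))) := by
  have h : ∀ s t : String, s.toList = t.toList → s = t := by
    intro s t hst
    have := congrArg String.ofList hst
    simpa using this
  apply h
  rw [PySem.Str.toList_join]
  simp only [PySem.Str.toList_replace, pvWALL, pvEMPTY, pvBOX, pvROBOT, pvBOX_WIDE,
    show ("" : String).toList = [] from rfl,
    show ("#" : String).toList = ['#'] from rfl,
    show ("#" ++ "#" : String).toList = ['#','#'] from rfl,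
    show ("." : String).toList = ['.'] from rfl,
    show ("." ++ "." : String).toList = ['.','.'] from rfl,
    show ("O" : String).toList = ['O'] from rfl,
    show ("[]" : String).toList = ['[',']'] from rfl,
    show ("@" : String).toList = ['@'] from rfl,
    show ("@" ++ "." : String).toList = ['@','.'] from rfl]
  rw [join_nil_flatten]
  rw [replace_single, replace_single, replace_single, replace_single,
      List.flatMap_assoc, List.flatMap_assoc, List.flatMap_assoc]
  rw [List.map_map, List.flatten_eq_flatMap, List.flatMap_map]
  apply List.flatMap_congr
  intro a _
  simpa using char_map_eq a

-- ===== VERDICT (by name: the statement is the Claim_ definition above) =====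
theorem widden_layout_spec : Claim_equal_widden_layout := by
  intro content _
  unfold Spec_widden_layout widden_layout widden_layout_alt
  apply List.map_congr_left
  intro line _
  exact line_eq line
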